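-- pv_equiv track=rewrite | github.com/KevinBlandy/notes | Python/practice/door/CommonUtils.py | getFloorHex
-- ===== SOURCE A (Python) =====
-- def getFloorHex(targets):
--     '''
--     根据楼层获取协议hex编码(8个字节)
--     :param targets:
--     :return:
--     '''
--     floors = [['0'], ['0'], ['0'], ['0'], ['0'], ['0'], ['0'], ['0']    # 1 - 8楼
--              ,['0'], ['0'], ['0'], ['0'], ['0'], ['0'], ['0'], ['0']
--              ,['0'], ['0'], ['0'], ['0'], ['0'], ['0'], ['0'], ['0']
--              ,['0'], ['0'], ['0'], ['0'], ['0'], ['0'], ['0'], ['0']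
--              ,['0'], ['0'], ['0'], ['0'], ['0'], ['0'], ['0'], ['0']
--              ,['0'], ['0'], ['0'], ['0'], ['0'], ['0'], ['0'], ['0']
--              ,['0'], ['0'], ['0'], ['0'], ['0'], ['0'], ['0'], ['0']
--              ,['0'], ['0'], ['0'], ['0'], ['0'], ['0'], ['0'], ['0']]       # 57 - 64楼
--     for i in set(targets):
--         floor = int(i)
--         if floor < 1:
--             floor = 1
--         elif floor > 64:
--             floor = 64
--         floors[floor - 1][0] = '1'
--     result = ''
--     floors.reverse()
--     for i in floors:
--         result += i[0]
--     return hex(int(result, 2)).replace('0x', '').zfill(16)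
-- ===== SOURCE B (Python) =====
-- def getFloorHex(targets):
--     '''
--     根据楼层获取协议hex编码(8个字节)
--     :param targets:
--     :return:
--     '''
--     mask = 0
--     for i in set(targets):
--         floor = int(i)
--         if floor < 1:
--             floor = 1
--         elif floor > 64:
--             floor = 64
--         mask |= 1 << (floor - 1)
--     return hex(mask).replace('0x', '').zfill(16)
-- ===== Notes on version B (the rewrite author's own statement) =====
-- stated objective: simpler
-- what changed: B keeps a single integer bitmask (mask |= 1 << (floor-1)) instead of A's 64-cell list of singleton string lists, dropping the list, the reverse and the string-concatenation/binary-parse second pass; the hex formatting line is unchanged.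
import Mathlib
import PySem

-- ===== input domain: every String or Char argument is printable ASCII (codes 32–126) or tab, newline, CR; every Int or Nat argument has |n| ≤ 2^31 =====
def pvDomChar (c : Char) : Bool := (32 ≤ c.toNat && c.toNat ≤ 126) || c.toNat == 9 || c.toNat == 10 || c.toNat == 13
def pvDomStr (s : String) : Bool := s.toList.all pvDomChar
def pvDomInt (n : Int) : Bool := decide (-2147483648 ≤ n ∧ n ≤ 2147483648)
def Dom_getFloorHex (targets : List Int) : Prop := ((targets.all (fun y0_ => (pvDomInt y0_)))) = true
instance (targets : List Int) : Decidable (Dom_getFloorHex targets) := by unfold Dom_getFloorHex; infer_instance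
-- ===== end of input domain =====

-- B replaces A's 64-cell list of string cells (reverse + string-concat + binary parse) by a
-- single integer bitmask: simpler, one pass. Both Pythons iterate a set; the result is
-- order-independent (idempotent, commuting per-element updates), so the ports fold over
-- PySem.Set.ofList.

-- hex(n).replace('0x','').zfill(16) for n ≥ 0 (both A and B end with this exact line):
-- Python's hex(n) for n ≥ 0 is "0x" + lowercase base-16 digits, which is '0'::'x':: Nat.toDigits 16 n.
def pyHexFmt (n : Nat) : String :=
  PySem.Str.zfill (PySem.Str.replace (String.ofList ('0' :: 'x' :: Nat.toDigits 16 n)) "0x" "") 16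

-- hand port of int(s, 2), exact on the nonempty '0'/'1' strings (no sign/space/underscore)
-- that getFloorHex feeds it
def binVal (cs : List Char) : Nat :=
  cs.foldl (fun n c => 2 * n + (if c = '1' then 1 else 0)) 0

-- ===== PORT A =====
def getFloorHex (targets : List Int) : String :=
  let floors0 : List (List String) := List.replicate 64 ["0"]
  let floors := (PySem.Set.ofList targets).foldl
    (fun fl (i : Int) =>
      let floor : Int := i
      let floor : Int := if floor < 1 then 1 else if floor > 64 then 64 else floor
      fl.set (floor - 1).toNat ["1"]) floors0   -- floors[floor-1][0] = '1' on singleton cells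
  let floors := floors.reverse
  let result : List Char :=
    floors.foldl (fun r cell => r ++ (cell.headD "").toList) []   -- result += i[0]
  pyHexFmt (binVal result)

-- ===== PORT B =====
def getFloorHex_alt (targets : List Int) : String :=
  -- mask is a Python int that stays ≥ 0, so it is a Nat here
  let mask : Nat := (PySem.Set.ofList targets).foldl
    (fun m (i : Int) =>
      let floor : Int := if i < 1 then 1 else if i > 64 then 64 else i
      m ||| (1 <<< (floor - 1).toNat)) 0
  pyHexFmt mask

-- ===== PRECONDITION & SPEC =====
def Spec_getFloorHex (targets : List Int) (out : String) : Prop := out = getFloorHex_alt targets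
instance (targets : List Int) (out : String) : Decidable (Spec_getFloorHex targets out) := by unfold Spec_getFloorHex; infer_instance

-- ===== CLAIM (what is proved, stated in full; the proofs are below) =====
def Claim_equal_getFloorHex : Prop := ∀ (targets : List Int), Dom_getFloorHex targets → Spec_getFloorHex targets (getFloorHex targets)

-- ===== LEMMAS AND PROOFS =====

-- the 64-cell list that A's floors array holds when B's mask is m
def maskFloors (m : Nat) : List (List String) :=
  (List.range 64).map (fun j => if m.testBit j then ["1"] else ["0"])

-- the clamped bit index both programs compute from a target i
def clampK (i : Int) : Nat :=
  ((if i < 1 then 1 else if i > 64 then 64 else i) - 1).toNat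

theorem clampK_lt (i : Int) : clampK i < 64 := by
  unfold clampK; split_ifs <;> omega

theorem maskFloors_zero : maskFloors 0 = List.replicate 64 ["0"] := by decide

theorem maskFloors_set (i : Int) (m : Nat) :
    (maskFloors m).set (clampK i) ["1"] = maskFloors (m ||| 1 <<< clampK i) := by
  apply List.ext_getElem
  · simp [maskFloors]
  · intro j h1 h2
    have hj : j < 64 := by simp [maskFloors] at h2; exact h2
    have hk := clampK_lt i
    simp only [maskFloors, List.getElem_set, List.getElem_map, List.getElem_range,
      Nat.shiftLeft_eq, one_mul, Nat.testBit_or, Nat.testBit_two_pow]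
    by_cases h : clampK i = j <;> simp [h]

theorem mask_lt (L : List Int) (m : Nat) (hm : m < 2 ^ 64) :
    L.foldl (fun m (i : Int) =>
      let floor : Int := if i < 1 then 1 else if i > 64 then 64 else i
      m ||| (1 <<< (floor - 1).toNat)) m < 2 ^ 64 := by
  induction L generalizing m with
  | nil => exact hm
  | cons x xs ih =>
      refine ih _ (Nat.or_lt_two_pow hm ?_)
      have := clampK_lt x
      calc 1 <<< clampK x = 2 ^ clampK x := by rw [Nat.shiftLeft_eq, one_mul]
        _ < 2 ^ 64 := Nat.pow_lt_pow_right (by omega) this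

theorem fold_eq (L : List Int) (m : Nat) :
    L.foldl (fun fl (i : Int) =>
        let floor : Int := i
        let floor : Int := if floor < 1 then 1 else if floor > 64 then 64 else floor
        fl.set (floor - 1).toNat ["1"]) (maskFloors m)
    = maskFloors (L.foldl (fun m (i : Int) =>
        let floor : Int := if i < 1 then 1 else if i > 64 then 64 else i
        m ||| (1 <<< (floor - 1).toNat)) m) := by
  induction L generalizing m with
  | nil => rfl
  | cons x xs ih =>
      simp only [List.foldl_cons]
      rw [show ((if (x:Int) < 1 then (1:Int) else if x > 64 then 64 else x) - 1).toNat
            = clampK x from rfl,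
          maskFloors_set x m]
      exact ih _

-- the parse of the MSB-first bit string of m recovers m (for m < 2^n)
theorem foldr_bits (n : Nat) : ∀ m : Nat, m < 2 ^ n →
    (List.range n).foldr (fun j acc => 2 * acc + (if m.testBit j then 1 else 0)) 0 = m := by
  induction n with
  | zero => intro m hm; interval_cases m; rfl
  | succ n ih =>
      intro m hm
      rw [List.range_succ_eq_map, List.foldr_cons, List.foldr_map]
      have h2 : (List.range n).foldr
          (fun j acc => 2 * acc + (if m.testBit (Nat.succ j) then 1 else 0)) 0 = m / 2 := by
        have := ih (m / 2) (by omega)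
        simpa [Nat.testBit_succ] using this
      rw [h2, Nat.testBit_zero]
      by_cases h : m % 2 = 1 <;> simp [h] <;> omega

theorem parse_maskFloors (m : Nat) (hm : m < 2 ^ 64) :
    binVal ((maskFloors m).reverse.foldl (fun r cell => r ++ (cell.headD "").toList) []) = m := by
  have hrender : (maskFloors m).reverse.foldl (fun r cell => r ++ (cell.headD "").toList) []
      = (List.range 64).reverse.map (fun j => if m.testBit j then '1' else '0') := by
    rw [maskFloors, ← List.map_reverse, List.foldl_map]
    have : ∀ (r : List Char) (j : Nat),
        r ++ ((if m.testBit j then ["1"] else ["0"]).headD "").toList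
        = r ++ [if m.testBit j then '1' else '0'] := by
      intro r j; by_cases h : m.testBit j <;> simp [h]
    simp only [this]
    rw [PySem.List.foldl_append_singleton_eq_map]
    simp
  rw [hrender]
  unfold binVal
  rw [List.foldl_map, List.foldl_reverse]
  have : ∀ (acc : Nat) (j : Nat),
      2 * acc + (if (if m.testBit j then '1' else '0') = '1' then 1 else 0)
      = 2 * acc + (if m.testBit j then 1 else 0) := by
    intro acc j; by_cases h : m.testBit j <;> simp [h]
  simp only [this]
  exact foldr_bits 64 m hm

-- ===== VERDICT (by name: the statement is the Claim_ definition above) =====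
theorem getFloorHex_spec : Claim_equal_getFloorHex := by
  intro targets _
  unfold Spec_getFloorHex getFloorHex getFloorHex_alt
  dsimp only
  rw [← maskFloors_zero, fold_eq]
  rw [parse_maskFloors _ (mask_lt (PySem.Set.ofList targets) 0 (by norm_num))]
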